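-- pv_equiv track=rewrite | github.com/manmeetsingh7781/DataStructures_Algorithms | src/Misc/Common_Functions.py | word_builder
-- ===== SOURCE A (Python) =====
-- def word_builder(arr: list):
--     result = []
--
--     # 2 loops creates com,bination of two characters ab, ac ... dc
--     for i in arr:
--         for j in arr:
--             for k in arr:
--                 for l in arr:
--                     if i != j != k != l:
--                         result.append(str(i) + str(j) + str(k) + str(l))
--     return result
-- ===== SOURCE B (Python) =====
-- def word_builder(arr: list):
--     result = []
--
--     def build(pref, prev, n):
--         if n == 0:
--             result.append(pref)
--             return
--         for c in arr:
--             if prev is None or c != prev: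
--                 build(pref + str(c), c, n - 1)
--
--     build('', None, 4)
--     return result
-- ===== Notes on version B (the rewrite author's own statement) =====
-- stated objective: alternative
-- what changed: Replaced the four flat nested loops with a terminal chained != test by a recursive build(prefix, prev, n) helper that extends the word one character at a time, pruning against the immediately preceding element as it descends, emitting words in the same order.
import Mathlib
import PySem

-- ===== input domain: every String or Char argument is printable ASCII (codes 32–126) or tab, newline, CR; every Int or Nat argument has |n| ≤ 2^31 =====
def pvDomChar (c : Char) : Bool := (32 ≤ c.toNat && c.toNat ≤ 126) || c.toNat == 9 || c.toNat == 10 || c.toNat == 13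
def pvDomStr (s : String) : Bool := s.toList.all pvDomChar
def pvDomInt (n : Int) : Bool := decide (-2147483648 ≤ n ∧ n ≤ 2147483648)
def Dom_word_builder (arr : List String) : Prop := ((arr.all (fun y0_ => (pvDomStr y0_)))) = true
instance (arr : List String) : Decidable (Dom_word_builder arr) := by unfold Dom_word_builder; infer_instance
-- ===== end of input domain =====

-- B builds each word recursively character-by-character with incremental adjacent-distinct pruning,
-- instead of A's four flat loops with a terminal chained condition; same output, same order (objective: alternative).

-- ===== PORT A =====
def word_builder (arr : List String) : List String :=
  arr.foldl (fun r i =>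
    arr.foldl (fun r j =>
      arr.foldl (fun r k =>
        arr.foldl (fun r l =>
          if i ≠ j ∧ j ≠ k ∧ k ≠ l then r ++ [i ++ j ++ k ++ l] else r) r) r) r) []

-- ===== PORT B =====
-- build(pref, prev, n): n = 0 emits pref; otherwise extend by each c with prev = None or c != prev.
def wbBuild (arr : List String) (pref : String) (prev : Option String) : Nat → List String
  | 0 => [pref]
  | Nat.succ n =>
      arr.foldl (fun acc c =>
        if (match prev with | none => true | some p => c != p) then
          acc ++ wbBuild arr (pref ++ c) (some c) n
        else acc) []

def word_builder_alt (arr : List String) : List String := wbBuild arr "" none 4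

-- ===== PRECONDITION & SPEC =====
def Spec_word_builder (arr : List String) (out : List String) : Prop := out = word_builder_alt arr
instance (arr : List String) (out : List String) : Decidable (Spec_word_builder arr out) := by unfold Spec_word_builder; infer_instance

-- ===== CLAIM (what is proved, stated in full; the proofs are below) =====
def Claim_equal_word_builder : Prop := ∀ (arr : List String), Dom_word_builder arr → Spec_word_builder arr (word_builder arr)

-- ===== LEMMAS AND PROOFS =====

-- 'if p(x): out += g(x)' inside a fold, as an append of a flatMap
theorem foldl_ite_append {α β : Type} (l : List α) (p : α → Prop) [DecidablePred p] (g : α → List β) (acc : List β) :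
    l.foldl (fun acc x => if p x then acc ++ g x else acc) acc
      = acc ++ l.flatMap (fun x => if p x then g x else []) := by
  induction l generalizing acc with
  | nil => simp
  | cons a t ih => by_cases h : p a <;> simp [h, ih, List.append_assoc]

theorem wbBuild_succ (arr : List String) (pref : String) (prev : Option String) (n : Nat) :
    wbBuild arr pref prev (n + 1)
      = arr.flatMap (fun c =>
          if (match prev with | none => true | some p => c != p) then
            wbBuild arr (pref ++ c) (some c) n
          else []) := by
  show arr.foldl _ [] = _
  rw [foldl_ite_append]; simp

theorem wbBuild_one (arr : List String) (pref : String) (prev : Option String) :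
    wbBuild arr pref prev 1
      = arr.flatMap (fun c =>
          if (match prev with | none => true | some p => c != p) then [pref ++ c] else []) := by
  rw [show (1:Nat) = 0+1 from rfl, wbBuild_succ]
  rfl

theorem wbBuild_two (arr : List String) (pref : String) (prev : Option String) :
    wbBuild arr pref prev 2
      = arr.flatMap (fun c =>
          if (match prev with | none => true | some p => c != p) then
            arr.flatMap (fun d => if d != c then [pref ++ c ++ d] else [])
          else []) := by
  rw [show (2:Nat) = 1+1 from rfl, wbBuild_succ]
  congr 1; funext c
  cases hm : (match prev with | none => true | some p => c != p) <;> simp [wbBuild_one]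

theorem wbBuild_three (arr : List String) (pref : String) (prev : Option String) :
    wbBuild arr pref prev 3
      = arr.flatMap (fun c =>
          if (match prev with | none => true | some p => c != p) then
            arr.flatMap (fun d => if d != c then
              arr.flatMap (fun e => if e != d then [pref ++ c ++ d ++ e] else [])
            else [])
          else []) := by
  rw [show (3:Nat) = 2+1 from rfl, wbBuild_succ]
  congr 1; funext c
  cases hm : (match prev with | none => true | some p => c != p) <;> simp [wbBuild_two]

theorem wbBuild_four (arr : List String) (pref : String) (prev : Option String) :
    wbBuild arr pref prev 4
      = arr.flatMap (fun c =>
          if (match prev with | none => true | some p => c != p) then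
            arr.flatMap (fun d => if d != c then
              arr.flatMap (fun e => if e != d then
                arr.flatMap (fun f => if f != e then [pref ++ c ++ d ++ e ++ f] else [])
              else [])
            else [])
          else []) := by
  rw [show (4:Nat) = 3+1 from rfl, wbBuild_succ]
  congr 1; funext c
  cases hm : (match prev with | none => true | some p => c != p) <;> simp [wbBuild_three]

-- ===== VERDICT (by name: the statement is the Claim_ definition above) =====
theorem word_builder_spec : Claim_equal_word_builder := by
  intro arr _
  unfold Spec_word_builder word_builder word_builder_alt
  simp only [foldl_ite_append, PySem.List.foldl_append_eq_flatMap, List.nil_append, wbBuild_four]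
  congr 1; funext i
  simp only [if_true]
  congr 1; funext j
  by_cases hij : j = i
  · simp [hij]
  · simp only [bne_iff_ne, Ne, hij, not_false_iff, if_true]
    congr 1; funext k
    by_cases hjk : k = j
    · simp [hjk, Ne.symm hij]
    · simp only [hjk, not_false_iff, if_true]
      congr 1; funext l
      by_cases hlk : l = k
      · simp [hlk, Ne.symm hjk]
      · simp [Ne.symm hij, Ne.symm hjk, Ne.symm hlk, hlk]
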